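-- pv_equiv track=rewrite | github.com/edadefterli/programlamaLaboratuvar- | 170401025_hw_2/170401025_hw_2.py | my_frequency_with_of_tuples
-- ===== SOURCE A (Python) =====
-- def my_frequency_with_of_tuples(list_1):  #liste yardımıyla histogram hesaplama
--     frequency_list=[]
--     for i in range(len(list_1)):
--         s=False
--         for j in range(len(frequency_list)):
--             if(list_1[i]==frequency_list[j][0]):
--                 frequency_list[j][1]=frequency_list[j][1]+1
--                 s=True
--         if(s==False):                              #eğer bir değerle ilk defa karşılaşıyorsa bu bloğa girer
--             frequency_list.append([list_1[i],1])
--     return frequency_list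
-- ===== SOURCE B (Python) =====
-- def my_frequency_with_of_tuples(list_1):
--     # two passes: collect distinct values in first-appearance order, then count each
--     uniques = []
--     for x in list_1:
--         found = False
--         for u in uniques:
--             if u == x:
--                 found = True
--         if not found:
--             uniques.append(x)
--     result = []
--     for v in uniques:
--         c = 0
--         for y in list_1:
--             if y == v:
--                 c = c + 1
--         result.append([v, c])
--     return result
-- ===== Notes on version B (the rewrite author's own statement) =====
-- stated objective: alternative
-- what changed: A builds the histogram in one interleaved find-or-append scan mutating counts in place; B makes two separate passes: first it collects the distinct values in first-appearance order, then for each distinct value it counts its occurrences with a fresh scan of the input.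
import Mathlib
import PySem

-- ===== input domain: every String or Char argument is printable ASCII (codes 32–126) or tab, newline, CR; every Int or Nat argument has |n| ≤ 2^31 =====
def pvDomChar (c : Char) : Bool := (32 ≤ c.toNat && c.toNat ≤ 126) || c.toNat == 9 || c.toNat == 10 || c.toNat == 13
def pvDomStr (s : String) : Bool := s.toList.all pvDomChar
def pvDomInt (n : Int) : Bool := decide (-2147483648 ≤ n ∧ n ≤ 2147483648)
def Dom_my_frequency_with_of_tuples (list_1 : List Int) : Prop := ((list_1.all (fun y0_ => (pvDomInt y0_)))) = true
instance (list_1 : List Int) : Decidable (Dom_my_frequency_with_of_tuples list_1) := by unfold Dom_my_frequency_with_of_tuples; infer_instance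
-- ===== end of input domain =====

-- B replaces A's single interleaved find-or-append scan by two separate passes
-- (distinct values in first-appearance order, then a counting scan per value); objective: alternative.


-- ===== PORT A =====
-- inner for-j loop over frequency_list: bump the count of every entry whose head equals x,
-- and report whether any matched (s)
def pvInnerA (x : Int) : List (List Int) → List (List Int) × Bool
  | [] => ([], false)
  | e :: rest =>
    let (r, s) := pvInnerA x rest
    match e with
    | [v, c] => if x == v then ([v, c + 1] :: r, true) else (e :: r, s)
    | _ => (e :: r, s)

def my_frequency_with_of_tuples (list_1 : List Int) : List (List Int) :=
  list_1.foldl (fun frequency_list x =>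
    let (r, s) := pvInnerA x frequency_list
    if s then r else r ++ [[x, 1]]) []

-- ===== PORT B =====
-- explicit ==-scan membership test
def pvContains (x : Int) : List Int → Bool
  | [] => false
  | u :: t => if u == x then true else pvContains x t

-- explicit counting loop
def pvCount (v : Int) (list_1 : List Int) : Int :=
  list_1.foldl (fun c y => if y == v then c + 1 else c) 0

def my_frequency_with_of_tuples_alt (list_1 : List Int) : List (List Int) :=
  let uniques := list_1.foldl (fun acc x => if pvContains x acc then acc else acc ++ [x]) []
  uniques.map (fun v => [v, pvCount v list_1])

-- ===== PRECONDITION & SPEC =====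
def Spec_my_frequency_with_of_tuples (list_1 : List Int) (out : List (List Int)) : Prop := out = my_frequency_with_of_tuples_alt list_1
instance (list_1 : List Int) (out : List (List Int)) : Decidable (Spec_my_frequency_with_of_tuples list_1 out) := by unfold Spec_my_frequency_with_of_tuples; infer_instance

-- ===== CLAIM (what is proved, stated in full; the proofs are below) =====
def Claim_equal_my_frequency_with_of_tuples : Prop := ∀ (list_1 : List Int), Dom_my_frequency_with_of_tuples list_1 → Spec_my_frequency_with_of_tuples list_1 (my_frequency_with_of_tuples list_1)

-- ===== LEMMAS AND PROOFS =====

theorem pvContains_append (x y : Int) (l : List Int) :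
    pvContains x (l ++ [y]) = (pvContains x l || (y == x)) := by
  induction l with
  | nil => by_cases h : y = x <;> simp [pvContains, h]
  | cons h t ih => by_cases hx : h == x <;> simp [pvContains, hx, ih]

theorem pvContains_eq_any (x : Int) (l : List Int) :
    pvContains x l = l.any (fun y => y == x) := by
  induction l with
  | nil => simp [pvContains]
  | cons h t ih => by_cases hx : h == x <;> simp [pvContains, hx, ih]

theorem uniq_contains (x : Int) (l acc : List Int) :
    pvContains x (l.foldl (fun acc x => if pvContains x acc then acc else acc ++ [x]) acc)
      = (pvContains x acc || l.any (fun y => y == x)) := by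
  induction l generalizing acc with
  | nil => simp only [List.foldl_nil, List.any_nil, Bool.or_false]
  | cons h t ih =>
    simp only [List.foldl_cons, ih, List.any_cons]
    by_cases hm : pvContains h acc
    · simp only [hm, if_pos]
      by_cases hx : h = x
      · subst hx; simp [hm]
      · simp [beq_eq_false_iff_ne.mpr hx]
    · simp [hm, pvContains_append, Bool.or_assoc]

theorem pvInnerA_map (x : Int) (L : List Int) (g : Int → Int) :
    pvInnerA x (L.map (fun v => [v, g v]))
      = (L.map (fun v => [v, if x == v then g v + 1 else g v]), L.any (fun v => x == v)) := by
  induction L with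
  | nil => simp [pvInnerA]
  | cons h t ih =>
    by_cases hx : x = h
    · subst hx; simp [pvInnerA, ih]
    · simp [pvInnerA, hx, ih]

theorem int_beq_comm (a b : Int) : (a == b) = (b == a) := by
  by_cases h : a = b
  · subst h; rfl
  · rw [beq_eq_false_iff_ne.mpr h, beq_eq_false_iff_ne.mpr (Ne.symm h)]

theorem pvCount_append (v x : Int) (l : List Int) :
    pvCount v (l ++ [x]) = (if x == v then pvCount v l + 1 else pvCount v l) := by
  simp [pvCount, List.foldl_append]

theorem pvCount_eq_zero (x : Int) (l : List Int) (n : Int)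
    (h : l.any (fun y => y == x) = false) :
    l.foldl (fun c y => if y == x then c + 1 else c) n = n := by
  induction l generalizing n with
  | nil => rfl
  | cons hd t ih =>
    simp only [List.any_cons, Bool.or_eq_false_iff] at h
    simp only [List.foldl_cons, h.1, Bool.false_eq_true, if_false]
    exact ih n h.2

theorem main_eq (l : List Int) :
    my_frequency_with_of_tuples l
      = (l.foldl (fun acc x => if pvContains x acc then acc else acc ++ [x]) []).map
          (fun v => [v, pvCount v l]) := by
  induction l using List.reverseRecOn with
  | nil => rfl
  | append_singleton l x ih =>
    have hU : ∀ v, (if x == v then pvCount v l + 1 else pvCount v l) = pvCount v (l ++ [x]) := by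
      intro v; rw [pvCount_append]
    rw [my_frequency_with_of_tuples, List.foldl_append, ← my_frequency_with_of_tuples,
        ih, List.foldl_append]
    simp only [List.foldl_cons, List.foldl_nil, pvInnerA_map]
    have hs : ∀ (U : List Int), U.any (fun v => x == v) = pvContains x U := by
      intro U
      rw [pvContains_eq_any]
      congr 1; funext v; exact int_beq_comm x v
    rw [hs]
    cases hc : pvContains x (l.foldl (fun acc x => if pvContains x acc then acc else acc ++ [x]) []) with
    | true =>
      simp only [if_pos]
      apply List.map_congr_left
      intro v _; rw [hU]
    | false =>
      simp only [Bool.false_eq_true, if_false, List.map_append, List.map_cons, List.map_nil]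
      have hzero : pvCount x l = 0 := by
        have hany : l.any (fun y => y == x) = false := by
          have h2 := uniq_contains x l []
          rw [hc] at h2
          simpa [pvContains] using h2.symm
        exact pvCount_eq_zero x l 0 hany
      congr 1
      · apply List.map_congr_left; intro v _; rw [hU]
      · rw [pvCount_append]
        simp [hzero]

-- ===== VERDICT (by name: the statement is the Claim_ definition above) =====
theorem my_frequency_with_of_tuples_spec : Claim_equal_my_frequency_with_of_tuples := by
  intro l _
  unfold Spec_my_frequency_with_of_tuples my_frequency_with_of_tuples_alt
  exact main_eq l
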